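-- pv_equiv track=rewrite | github.com/vincenzo-uibk/nnets | CommandLineOptions.py | get_multival_param
-- ===== SOURCE A (Python) =====
-- def get_multival_param(arguments, name, alt_name=None):
--     '''
--     Gets the values of the given parameter.
--     In:
--         arguments - an array of strings representing the command line parameters;
--         name - the name of the sought parameter.
--     Out:
--         a list of strings representing the values of the sought parameter, extracted from arguments,
--         or None if the parameter is not present
--     '''
--     values = None
--
--     found = False
--     for param in arguments:
--         if found:
--             if param.startswith("-"):
--                 break
--             else:
--                 values.append(param)
--         else:
--             if param == name or (alt_name!=None and param == alt_name):
--                 values = list()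
--                 found = True
--
--     return values
-- ===== SOURCE B (Python) =====
-- def get_multival_param(arguments, name, alt_name=None):
--     for i, param in enumerate(arguments):
--         if param == name or (alt_name != None and param == alt_name):
--             values = []
--             for tok in arguments[i+1:]:
--                 if tok.startswith("-"):
--                     break
--                 values.append(tok)
--             return values
--     return None
-- ===== Notes on version B (the rewrite author's own statement) =====
-- stated objective: simpler
-- what changed: Replaces the single stateful flag-driven pass (found flag, values accumulator, break) with a find-the-flag-then-collect two-phase structure that returns directly from inside the loop.
import Mathlib
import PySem

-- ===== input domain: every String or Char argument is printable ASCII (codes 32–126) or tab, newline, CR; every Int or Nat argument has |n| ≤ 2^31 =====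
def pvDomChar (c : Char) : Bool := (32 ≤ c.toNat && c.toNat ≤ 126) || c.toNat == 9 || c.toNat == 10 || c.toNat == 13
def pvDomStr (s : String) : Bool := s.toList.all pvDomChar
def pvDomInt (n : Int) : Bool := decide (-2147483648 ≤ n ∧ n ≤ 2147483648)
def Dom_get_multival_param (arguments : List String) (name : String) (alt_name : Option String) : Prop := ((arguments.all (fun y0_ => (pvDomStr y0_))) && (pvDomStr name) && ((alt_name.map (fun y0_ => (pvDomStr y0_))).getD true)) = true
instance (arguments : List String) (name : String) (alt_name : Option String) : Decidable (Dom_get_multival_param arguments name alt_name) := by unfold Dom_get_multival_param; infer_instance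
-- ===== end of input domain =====

-- B replaces A's single stateful flag-driven pass with a find-then-collect two-phase decomposition (objective: simpler).

-- ===== PORT A =====
-- A's loop, carrying the values accumulator (None until the flag is seen) and the found flag.
def pvA_loop (name : String) (alt_name : Option String) :
    List String → Option (List String) → Bool → Option (List String)
  | [], values, _ => values
  | param :: rest, values, found =>
    if found then
      if PySem.Str.startswith param "-" then values
      else pvA_loop name alt_name rest (values.map (fun vs => vs ++ [param])) true
    else
      if param == name || (alt_name ≠ none && some param == alt_name) then
        pvA_loop name alt_name rest (some []) true
      else
        pvA_loop name alt_name rest values false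

def get_multival_param (arguments : List String) (name : String) (alt_name : Option String) : Option (List String) :=
  pvA_loop name alt_name arguments none false

-- ===== PORT B =====
-- collect tokens after the flag, breaking at the first one starting with "-"
def pvB_collect : List String → List String
  | [] => []
  | tok :: rest => if PySem.Str.startswith tok "-" then [] else tok :: pvB_collect rest

def get_multival_param_alt (arguments : List String) (name : String) (alt_name : Option String) : Option (List String) :=
  match arguments with
  | [] => none
  | param :: rest =>
    if param == name || (alt_name ≠ none && some param == alt_name) then
      some (pvB_collect rest)
    else
      get_multival_param_alt rest name alt_name

-- ===== PRECONDITION & SPEC =====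
def Spec_get_multival_param (arguments : List String) (name : String) (alt_name : Option String) (out : Option (List String)) : Prop := out = get_multival_param_alt arguments name alt_name
instance (arguments : List String) (name : String) (alt_name : Option String) (out : Option (List String)) : Decidable (Spec_get_multival_param arguments name alt_name out) := by unfold Spec_get_multival_param; infer_instance

-- ===== CLAIM (what is proved, stated in full; the proofs are below) =====
def Claim_equal_get_multival_param : Prop := ∀ (arguments : List String) (name : String) (alt_name : Option String), Dom_get_multival_param arguments name alt_name → Spec_get_multival_param arguments name alt_name (get_multival_param arguments name alt_name)

-- ===== LEMMAS AND PROOFS =====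
theorem pvA_loop_found (name : String) (alt_name : Option String) :
    ∀ (rest : List String) (vs : List String),
      pvA_loop name alt_name rest (some vs) true = some (vs ++ pvB_collect rest) := by
  intro rest
  induction rest with
  | nil => intro vs; simp [pvA_loop, pvB_collect]
  | cons p r ih =>
    intro vs
    cases h : PySem.Chars.startswith p.toList ['-'] <;>
      simp [pvA_loop, pvB_collect, h, ih]

theorem pvA_loop_search (name : String) (alt_name : Option String) :
    ∀ (args : List String),
      pvA_loop name alt_name args none false = get_multival_param_alt args name alt_name := by
  intro args
  induction args with
  | nil => simp [pvA_loop, get_multival_param_alt]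
  | cons p r ih =>
    by_cases h : (p = name ∨ (¬alt_name = none ∧ some p = alt_name))
    · simp [pvA_loop, get_multival_param_alt, h, pvA_loop_found]
    · simp [pvA_loop, get_multival_param_alt, h, ih]

-- ===== VERDICT (by name: the statement is the Claim_ definition above) =====
theorem get_multival_param_spec : Claim_equal_get_multival_param := by
  intro arguments name alt_name _
  unfold Spec_get_multival_param get_multival_param
  exact pvA_loop_search name alt_name arguments
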